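-- pv_equiv track=rewrite | github.com/Pamorimd/Cadastramento-de-Produtos | cadastramento_produtos.py | criptografiaDescriptografia
-- ===== SOURCE A (Python) =====
-- def criptografiaDescriptografia(palavra, x):
--     # Lista com as lestras de 'A' a 'Z'
--     T = ['Z', 'A', 'B', 'C', 'D', 'E', 'F', 'G', 'H', 'I', 'J', 'K', 'L', 'M', 'N', 'O', 'P', 'Q', 'R', 'S', 'T', 'U', 'V', 'W', 'X', 'Y']
--     #Lista com os numeros das letras da palavra digitada
--     I = [T.index(c) for c in palavra if c in T]
--     #Caso a palavra seja impar, adiciona um 0 extra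
--     if len(I) % 2 != 0:
--         I.append(0)
--     #Cria os vetores na matriz inicial
--     num_cols = 2
--     P = [I[i:i+num_cols] for i in range(0, len(I), num_cols)]
--     if x == 1:
--         A = ([[11, 13], [2, 3]])
--     else:
--         A = ([[45, -195], [-30, 165]])
--     #Mutiplicação da Matriz da palavra e da de criptografia
--     vetor = []
--     matriz = []
--     for d in range(len(P)):
--         for k in range(len(A)):
--             for c in range(len(P[d])):
--                 B = A[k][c]*P[d][c]
--                 vetor.append(B)
--                 if len(vetor) > 1:
--                     matriz.append(sum(vetor))
--                     vetor = []
--     for i in range(len(matriz)):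
--         if matriz[i] > 26:
--             matriz[i] = matriz[i] % 26
--         elif matriz[i] < 0:
--             while matriz[i] < 0:
--                 matriz[i] = matriz[i] + 26
--     #Cria vetores na matriz resultante
--     num_cols = 2
--     vetores = [matriz[i:i+num_cols] for i in range(0, len(matriz), num_cols)]
--     #Transforma os numeros em letras novamente
--     TC = []
--     for col in vetores:
--             for c in col:
--                 TC.append(T[c])
--     if len(palavra) % 2 != 0:
--         ul = len(TC)-1
--         del(TC[ul])
--     texto = ''.join(TC)
--     return texto
-- ===== SOURCE B (Python) =====
-- def criptografiaDescriptografia(palavra, x):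
--     T = ['Z', 'A', 'B', 'C', 'D', 'E', 'F', 'G', 'H', 'I', 'J', 'K', 'L', 'M',
--          'N', 'O', 'P', 'Q', 'R', 'S', 'T', 'U', 'V', 'W', 'X', 'Y']
--     I = [T.index(c) for c in palavra if c in T]
--     if len(I) % 2 != 0:
--         I.append(0)
--     if x == 1:
--         a, b, c, d = 11, 13, 2, 3
--     else:
--         a, b, c, d = 45, -195, -30, 165
--     # one fused pass: per pair, multiply, adjust and map back to letters directly
--     out = []
--     for j in range(0, len(I), 2):
--         p0, p1 = I[j], I[j + 1]
--         for v in (a * p0 + b * p1, c * p0 + d * p1):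
--             if v > 26:
--                 v %= 26
--             elif v < 0:
--                 v %= 26
--             out.append(T[v])
--     texto = ''.join(out)
--     if len(palavra) % 2 != 0:
--         texto = texto[:-1]
--     return texto
-- ===== Notes on version B (the rewrite author's own statement) =====
-- stated objective: simpler
-- what changed: A's separate stages (chunk I into a matrix, triple nested multiply loop with vetor/matriz accumulators, adjustment pass, re-chunk, letter-conversion pass) are fused into one loop over consecutive index pairs that multiplies, adjusts and maps back to letters directly.
import Mathlib
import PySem

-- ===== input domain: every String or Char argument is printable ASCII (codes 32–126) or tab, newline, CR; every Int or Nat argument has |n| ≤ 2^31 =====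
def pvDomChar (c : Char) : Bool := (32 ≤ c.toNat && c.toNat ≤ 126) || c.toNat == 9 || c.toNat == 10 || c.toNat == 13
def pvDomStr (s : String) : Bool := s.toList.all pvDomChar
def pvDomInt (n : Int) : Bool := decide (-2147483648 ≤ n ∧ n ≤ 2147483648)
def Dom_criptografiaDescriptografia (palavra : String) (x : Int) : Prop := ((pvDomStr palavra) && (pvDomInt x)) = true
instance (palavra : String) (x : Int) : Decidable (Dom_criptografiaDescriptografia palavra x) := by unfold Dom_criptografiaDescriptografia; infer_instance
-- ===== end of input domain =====

-- B fuses A's chunk / multiply / adjust / re-chunk / letter passes into one loop over index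
-- pairs (objective: simpler, same return value; neither Python mutates its arguments).

-- Shared by both ports: the letter table T and the lines
-- `I = [T.index(c) for c in palavra if c in T]` + odd-length padding,
-- which are verbatim identical in both Python sources.
def pvT : List Char := ['Z', 'A', 'B', 'C', 'D', 'E', 'F', 'G', 'H', 'I', 'J', 'K', 'L', 'M',
                        'N', 'O', 'P', 'Q', 'R', 'S', 'T', 'U', 'V', 'W', 'X', 'Y']

def pvI (palavra : String) : List Int :=
  (palavra.toList.filter (fun c => pvT.contains c)).map
    (fun c => (((PySem.List.index? pvT c).getD 0 : Nat) : Int))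

def pvIpad (palavra : String) : List Int :=
  let I := pvI palavra
  if I.length % 2 ≠ 0 then I ++ [0] else I

-- ===== PORT A =====
-- the `while matriz[i] < 0: matriz[i] += 26` loop of A
def pvAddUntil (m : Int) : Int :=
  if m < 0 then pvAddUntil (m + 26) else m
termination_by (-m).toNat
decreasing_by omega

-- `[xs[i:i+2] for i in range(0, len(xs), 2)]` (used for both P and vetores)
def pvChunk2 (xs : List Int) : List (List Int) :=
  (PySem.List.pyRange 0 (xs.length : Int) 2).map
    (fun i => PySem.List.slice xs (some i) (some (i + 2)))

-- A's triple nested multiplication loop over (vetor, matriz)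
def pvMultLoop (Amat : List (List Int)) (P : List (List Int)) : List Int × List Int :=
  (PySem.List.pyRange 0 (P.length : Int) 1).foldl (fun st d =>
    (PySem.List.pyRange 0 (Amat.length : Int) 1).foldl (fun st k =>
      (PySem.List.pyRange 0 ((PySem.List.pyGetD P d []).length : Int) 1).foldl (fun st c =>
        let B := PySem.List.pyGetD (PySem.List.pyGetD Amat k []) c 0 *
                   PySem.List.pyGetD (PySem.List.pyGetD P d []) c 0
        let vetor := st.1 ++ [B]
        if vetor.length > 1 then (([] : List Int), st.2 ++ [vetor.sum]) else (vetor, st.2))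
        st) st)
    (([] : List Int), ([] : List Int))

def criptografiaDescriptografia (palavra : String) (x : Int) : String :=
  let I := pvIpad palavra
  let P := pvChunk2 I
  let Amat : List (List Int) := if x = 1 then [[11, 13], [2, 3]] else [[45, -195], [-30, 165]]
  let vm := pvMultLoop Amat P
  -- the in-place elementwise adjustment loop `for i in range(len(matriz)): matriz[i] = …`
  let matriz := vm.2.map (fun m =>
    if m > 26 then PySem.Int.mod m 26 else if m < 0 then pvAddUntil m else m)
  let vetores := pvChunk2 matriz
  -- TC.append(T[c]); the default '?' is never read under Pre_ (T[26] would be IndexError)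
  let TC : List Char :=
    vetores.foldl (fun tc col => col.foldl (fun tc c => tc ++ [PySem.List.pyGetD pvT c '?']) tc) []
  -- del TC[-1]; dropLast of [] is the excluded IndexError case
  let TC := if palavra.toList.length % 2 ≠ 0 then TC.dropLast else TC
  String.ofList TC

-- ===== PORT B =====
def criptografiaDescriptografia_alt (palavra : String) (x : Int) : String :=
  let I := pvIpad palavra
  let m : Int × Int × Int × Int := if x = 1 then (11, 13, 2, 3) else (45, -195, -30, 165)
  -- for j in range(0, len(I), 2): one fused pass per pair
  let out : List Char :=
    (PySem.List.pyRange 0 (I.length : Int) 2).foldl (fun out j =>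
      let p0 := PySem.List.pyGetD I j 0
      let p1 := PySem.List.pyGetD I (j + 1) 0
      [m.1 * p0 + m.2.1 * p1, m.2.2.1 * p0 + m.2.2.2 * p1].foldl (fun out v =>
        let v := if v > 26 then PySem.Int.mod v 26 else if v < 0 then PySem.Int.mod v 26 else v
        out ++ [PySem.List.pyGetD pvT v '?']) out) []
  let texto := out
  if palavra.toList.length % 2 ≠ 0 then String.ofList texto.dropLast else String.ofList texto

-- ===== PRECONDITION & SPEC =====
-- the raw (pre-adjustment) matrix products, used only to state where A raises IndexError
def pvPairs : List Int → List (Int × Int)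
  | p0 :: p1 :: rest => (p0, p1) :: pvPairs rest
  | _ => []

def pvRawVals (palavra : String) (x : Int) : List Int :=
  let m : Int × Int × Int × Int := if x = 1 then (11, 13, 2, 3) else (45, -195, -30, 165)
  (pvPairs (pvIpad palavra)).flatMap
    (fun p => [m.1 * p.1 + m.2.1 * p.2, m.2.2.1 * p.1 + m.2.2.2 * p.2])

-- Pre_ excludes exactly the inputs on which A raises IndexError: an odd-length palavra with
-- no letter of T in it (`del TC[-1]` on an empty list), and inputs where a matrix product
-- equals 26 (`T[26]`). A returns normally everywhere else.
def Pre_criptografiaDescriptografia (palavra : String) (x : Int) : Prop :=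
  ¬(palavra.toList.length % 2 = 1 ∧ pvI palavra = []) ∧ (26 : Int) ∉ pvRawVals palavra x
instance (palavra : String) (x : Int) : Decidable (Pre_criptografiaDescriptografia palavra x) := by
  unfold Pre_criptografiaDescriptografia; infer_instance

def pvWitness_criptografiaDescriptografia : String × Int := ("AB", 1)

def Spec_criptografiaDescriptografia (palavra : String) (x : Int) (out : String) : Prop :=
  out = criptografiaDescriptografia_alt palavra x
instance (palavra : String) (x : Int) (out : String) : Decidable (Spec_criptografiaDescriptografia palavra x out) := by
  unfold Spec_criptografiaDescriptografia; infer_instance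

-- ===== CLAIM (what is proved, stated in full; the proofs are below) =====
def Claim_equal_criptografiaDescriptografia : Prop := ∀ (palavra : String) (x : Int), Dom_criptografiaDescriptografia palavra x → Pre_criptografiaDescriptografia palavra x → Spec_criptografiaDescriptografia palavra x (criptografiaDescriptografia palavra x)


-- ===== LEMMAS AND PROOFS =====

lemma pvAddUntil_eq (m : Int) (h : m < 0) : pvAddUntil m = PySem.Int.mod m 26 := by
  rw [PySem.Int.mod_eq_emod_of_pos (by norm_num)]
  fun_induction pvAddUntil m with
  | case1 m hlt ih =>
    by_cases h2 : m + 26 < 0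
    · rw [ih h2]; omega
    · rw [pvAddUntil, if_neg h2]; omega
  | case2 m hge => omega

lemma pyRange_two (n : Nat) :
    PySem.List.pyRange 0 ((2 * n : Nat) : Int) 2 = (List.range n).map (fun k => ((2 * k : Nat) : Int)) := by
  rw [PySem.List.pyRange_of_pos 0 _ (by norm_num)]
  rcases Nat.eq_zero_or_pos n with h | h
  · simp [h]
  · have hlt : (0:Int) < ((2*n : Nat):Int) := by push_cast; omega
    simp only [if_pos hlt]
    have : ((((2*n : Nat):Int) - 0 + 2 - 1) / 2).toNat = n := by push_cast; omega
    rw [this]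
    apply List.map_congr_left
    intro k _
    push_cast; ring

-- a step-2 index loop over an even-length list is a loop over its consecutive pairs
lemma foldG {γ : Type} (g : γ → Int → Int → γ) :
    ∀ (n : Nat) (I : List Int), I.length = 2 * n → ∀ (init : γ),
    (PySem.List.pyRange 0 (I.length : Int) 2).foldl
      (fun acc j => g acc (PySem.List.pyGetD I j 0) (PySem.List.pyGetD I (j + 1) 0)) init
    = (pvPairs I).foldl (fun acc p => g acc p.1 p.2) init := by
  intro n
  induction n with
  | zero =>
    intro I h init
    have : I = [] := List.length_eq_zero_iff.mp (by omega)
    subst this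
    simp [PySem.List.pyRange, pvPairs]
  | succ n ih =>
    intro I h init
    match I, h with
    | [], h => simp at h
    | p0 :: p1 :: rest, h =>
      have hr : rest.length = 2 * n := by simp at h; omega
      have hI : ((p0 :: p1 :: rest).length : Int) = ((2 * (n+1) : Nat) : Int) := by
        push_cast [hr]; omega
      rw [hI, pyRange_two, List.range_succ_eq_map, List.map_cons, List.foldl_cons, List.map_map,
        List.foldl_map]
      have h0 : PySem.List.pyGetD (p0::p1::rest) ((2*0:Nat):Int) 0 = p0 := by
        simp
      have h1 : PySem.List.pyGetD (p0::p1::rest) (((2*0:Nat):Int)+1) 0 = p1 := by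
        have e : ((2*0:Nat):Int)+1 = ((1:Nat):Int) := by norm_num
        rw [e, PySem.List.pyGetD_natCast]
        rfl
      rw [h0, h1]
      have hstep : ∀ (acc : γ) (k : Nat),
          g acc (PySem.List.pyGetD (p0::p1::rest) (((2*(Nat.succ k) : Nat)) : Int) 0)
                (PySem.List.pyGetD (p0::p1::rest) ((((2*(Nat.succ k) : Nat)) : Int)+1) 0)
          = g acc (PySem.List.pyGetD rest ((2*k : Nat) : Int) 0)
                  (PySem.List.pyGetD rest (((2*k : Nat) : Int)+1) 0) := by
        intro acc k
        have e1 : PySem.List.pyGetD (p0::p1::rest) (((2*(Nat.succ k) : Nat)) : Int) 0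
            = PySem.List.pyGetD rest ((2*k : Nat) : Int) 0 := by
          rw [PySem.List.pyGetD_natCast, PySem.List.pyGetD_natCast]
          show (p0::p1::rest).getD (2*(k+1)) 0 = rest.getD (2*k) 0
          have : 2*(k+1) = (2*k) + 1 + 1 := by omega
          rw [this]
          rfl
        have e2 : PySem.List.pyGetD (p0::p1::rest) ((((2*(Nat.succ k) : Nat)) : Int)+1) 0
            = PySem.List.pyGetD rest (((2*k : Nat) : Int)+1) 0 := by
          have c1 : (((2*(Nat.succ k) : Nat)) : Int)+1 = ((2*(k+1)+1 : Nat) : Int) := by push_cast; ring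
          have c2 : ((2*k : Nat) : Int)+1 = ((2*k+1 : Nat) : Int) := by push_cast; ring
          rw [c1, c2, PySem.List.pyGetD_natCast, PySem.List.pyGetD_natCast]
          show (p0::p1::rest).getD (2*(k+1)+1) 0 = rest.getD (2*k+1) 0
          have : 2*(k+1)+1 = (2*k+1) + 1 + 1 := by omega
          rw [this]
          rfl
        rw [e1, e2]
      have hfold := PySem.List.foldl_congr_mem
        (l := List.range n) (init := g init p0 p1)
        (f := fun acc k => g acc (PySem.List.pyGetD (p0::p1::rest) (((2*(Nat.succ k) : Nat)) : Int) 0)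
              (PySem.List.pyGetD (p0::p1::rest) ((((2*(Nat.succ k) : Nat)) : Int)+1) 0))
        (g := fun acc k => g acc (PySem.List.pyGetD rest ((2*k : Nat) : Int) 0)
              (PySem.List.pyGetD rest (((2*k : Nat) : Int)+1) 0))
        (fun acc k _ => hstep acc k)
      have hrest := ih rest hr (g init p0 p1)
      rw [show (rest.length : Int) = ((2*n : Nat) : Int) by rw [hr], pyRange_two, List.foldl_map] at hrest
      show _ = (pvPairs rest).foldl (fun acc p => g acc p.1 p.2) (g init p0 p1)
      rw [← hrest]
      exact hfold

-- chunking an even-length list into 2-slices is its pair list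
lemma chunk2_eq : ∀ (n : Nat) (I : List Int), I.length = 2 * n →
    pvChunk2 I = (pvPairs I).map (fun p => [p.1, p.2]) := by
  intro n
  induction n with
  | zero =>
    intro I h
    have : I = [] := List.length_eq_zero_iff.mp (by omega)
    subst this
    simp [pvChunk2, PySem.List.pyRange, pvPairs]
  | succ n ih =>
    intro I h
    match I, h with
    | [], h => simp at h
    | p0 :: p1 :: rest, h =>
      have hr : rest.length = 2 * n := by simp at h; omega
      have hI : ((p0 :: p1 :: rest).length : Int) = ((2 * (n+1) : Nat) : Int) := by
        push_cast [hr]; omega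
      unfold pvChunk2
      rw [hI, pyRange_two, List.range_succ_eq_map]
      simp only [List.map_cons, List.map_map]
      have hhd : PySem.List.slice (p0::p1::rest) (some ((2*0:Nat):Int)) (some (((2*0:Nat):Int) + 2)) = [p0, p1] := by
        have e2 : ((2*0:Nat):Int) + 2 = ((2:Nat):Int) := by norm_num
        rw [e2, show ((2*0:Nat):Int) = ((0:Nat):Int) by norm_num, PySem.List.slice_natCast]
        rfl
      rw [hhd]
      have htl : ∀ k : Nat,
          PySem.List.slice (p0::p1::rest) (some ((2*(Nat.succ k):Nat):Int)) (some (((2*(Nat.succ k):Nat):Int) + 2))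
          = PySem.List.slice rest (some ((2*k:Nat):Int)) (some (((2*k:Nat):Int) + 2)) := by
        intro k
        have c1 : ((2*(Nat.succ k):Nat):Int) + 2 = ((2*(k+1)+2:Nat):Int) := by push_cast; ring
        have c2 : ((2*k:Nat):Int) + 2 = ((2*k+2:Nat):Int) := by push_cast; ring
        rw [c1, c2, PySem.List.slice_natCast, PySem.List.slice_natCast]
        have d1 : 2*(k+1)+2 - 2*(k+1) = 2 := by omega
        have d2 : 2*k+2 - 2*k = 2 := by omega
        rw [d1, d2, show 2*(k+1) = 2*k + 1 + 1 by omega]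
        rfl
      have hrw := ih rest hr
      unfold pvChunk2 at hrw
      rw [show (rest.length : Int) = ((2*n : Nat) : Int) by rw [hr], pyRange_two, List.map_map] at hrw
      rw [show pvPairs (p0::p1::rest) = (p0,p1) :: pvPairs rest from rfl, List.map_cons]
      congr 1
      rw [← hrw]
      apply List.map_congr_left
      intro k _
      simp only [Function.comp_apply]
      exact htl k

lemma len_flatMap_raw (a b c d : Int) (ps : List (Int × Int)) :
    (ps.flatMap (fun p => [a*p.1 + b*p.2, c*p.1 + d*p.2])).length = 2 * ps.length := by
  induction ps with
  | nil => simp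
  | cons p t ih => simp [ih]; omega

-- A's triple loop over the pair matrix, with empty vetor between pairs
lemma multAux (a b c d : Int) : ∀ (ps : List (Int × Int)) (m : List Int),
    ps.foldl (fun st p =>
      (PySem.List.pyRange 0 (([[a,b],[c,d]] : List (List Int)).length : Int) 1).foldl (fun st k =>
        (PySem.List.pyRange 0 (([p.1, p.2] : List Int).length : Int) 1).foldl (fun (st : List Int × List Int) c' =>
          let B := PySem.List.pyGetD (PySem.List.pyGetD [[a,b],[c,d]] k []) c' 0 *
                     PySem.List.pyGetD [p.1, p.2] c' 0
          let vetor := st.1 ++ [B]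
          if vetor.length > 1 then (([] : List Int), st.2 ++ [vetor.sum]) else (vetor, st.2))
          st) st) (([] : List Int), m)
    = ([], m ++ ps.flatMap (fun p => [a*p.1 + b*p.2, c*p.1 + d*p.2])) := by
  intro ps
  induction ps with
  | nil => intro m; simp
  | cons p t ih =>
    intro m
    rw [List.foldl_cons]
    have hstep :
        (PySem.List.pyRange 0 (([[a,b],[c,d]] : List (List Int)).length : Int) 1).foldl (fun st k =>
          (PySem.List.pyRange 0 (([p.1, p.2] : List Int).length : Int) 1).foldl (fun (st : List Int × List Int) c' =>
            let B := PySem.List.pyGetD (PySem.List.pyGetD [[a,b],[c,d]] k []) c' 0 *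
                       PySem.List.pyGetD [p.1, p.2] c' 0
            let vetor := st.1 ++ [B]
            if vetor.length > 1 then (([] : List Int), st.2 ++ [vetor.sum]) else (vetor, st.2))
            st) (([] : List Int), m)
        = (([] : List Int), m ++ [a*p.1 + b*p.2, c*p.1 + d*p.2]) := by
      have hR : PySem.List.pyRange 0 (2:Int) 1 = [0, 1] := by decide
      norm_num [hR, List.foldl_cons, List.foldl_nil, PySem.List.pyGetD, PySem.List.pyGet?, PySem.List.pyIdx?]
    refine Eq.trans ?_ (by simp [List.flatMap_cons, List.append_assoc] :
      ([], (m ++ [a*p.1 + b*p.2, c*p.1 + d*p.2]) ++ t.flatMap (fun p => [a*p.1 + b*p.2, c*p.1 + d*p.2]))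
        = (([] : List Int), m ++ (p :: t).flatMap (fun p => [a*p.1 + b*p.2, c*p.1 + d*p.2])))
    rw [← ih (m ++ [a*p.1 + b*p.2, c*p.1 + d*p.2])]
    rw [hstep]

lemma multLoop_eq (a b c d : Int) (ps : List (Int × Int)) :
    pvMultLoop [[a,b],[c,d]] (ps.map (fun p => [p.1, p.2]))
      = ([], ps.flatMap (fun p => [a*p.1 + b*p.2, c*p.1 + d*p.2])) := by
  unfold pvMultLoop
  rw [PySem.List.foldl_pyRange_zero_pyGetD' (ps.map (fun p => [p.1, p.2])) ([] : List Int)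
    (fun st row =>
      (PySem.List.pyRange 0 (([[a,b],[c,d]] : List (List Int)).length : Int) 1).foldl (fun st k =>
        (PySem.List.pyRange 0 (row.length : Int) 1).foldl (fun (st : List Int × List Int) c' =>
          let B := PySem.List.pyGetD (PySem.List.pyGetD [[a,b],[c,d]] k []) c' 0 *
                     PySem.List.pyGetD row c' 0
          let vetor := st.1 ++ [B]
          if vetor.length > 1 then (([] : List Int), st.2 ++ [vetor.sum]) else (vetor, st.2))
          st) st) (([] : List Int), ([] : List Int))]
  rw [List.foldl_map]
  exact (multAux a b c d ps []).trans (by simp)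

-- the letter-conversion double loop is a flatMap
lemma tcLoop (cols : List (List Int)) :
    cols.foldl (fun tc col => col.foldl (fun tc c => tc ++ [PySem.List.pyGetD pvT c '?']) tc) []
      = cols.flatMap (fun col => col.map (fun c => PySem.List.pyGetD pvT c '?')) := by
  have h1 : ∀ (tc : List Char) (col : List Int),
      col.foldl (fun tc c => tc ++ [PySem.List.pyGetD pvT c '?']) tc
        = tc ++ col.map (fun c => PySem.List.pyGetD pvT c '?') :=
    fun tc col => PySem.List.foldl_append_singleton_eq_map _ col tc
  calc cols.foldl (fun tc col => col.foldl (fun tc c => tc ++ [PySem.List.pyGetD pvT c '?']) tc) []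
      = cols.foldl (fun tc col => tc ++ col.map (fun c => PySem.List.pyGetD pvT c '?')) [] := by
        apply PySem.List.foldl_congr_mem
        intro tc col _
        exact h1 tc col
    _ = _ := by
        rw [PySem.List.foldl_append_eq_flatMap]
        simp

-- the two adjustment branches agree: adding 26 repeatedly is % 26 on negatives
lemma adj_eq (m : Int) :
    (if m > 26 then PySem.Int.mod m 26 else if m < 0 then pvAddUntil m else m)
      = (if m > 26 then PySem.Int.mod m 26 else if m < 0 then PySem.Int.mod m 26 else m) := by
  split_ifs with h1 h2
  · rfl
  · exact pvAddUntil_eq m h2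
  · rfl

lemma pad_even (palavra : String) : ∃ n : Nat, (pvIpad palavra).length = 2 * n := by
  unfold pvIpad
  by_cases h : (pvI palavra).length % 2 ≠ 0
  · simp only [if_pos h, List.length_append, List.length_cons, List.length_nil]
    exact ⟨((pvI palavra).length + 1) / 2, by omega⟩
  · simp only [if_neg h]
    exact ⟨(pvI palavra).length / 2, by omega⟩

-- letters of the pairs of a mapped even-length list, as a single map
lemma pairsLetters (f : Int → Int) (g : Int → Char) : ∀ (n : Nat) (M : List Int), M.length = 2 * n →
    (pvPairs (M.map f)).flatMap (fun p => [g p.1, g p.2]) = M.map (fun v => g (f v)) := by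
  intro n
  induction n with
  | zero =>
    intro M h
    have : M = [] := List.length_eq_zero_iff.mp (by omega)
    subst this
    simp [pvPairs]
  | succ n ih =>
    intro M h
    match M, h with
    | [], h => simp at h
    | m0 :: m1 :: rest, h =>
      have hr : rest.length = 2 * n := by simp at h; omega
      simp [pvPairs, ih rest hr]

lemma flatMapLetters (g : Int → Char) (r1 r2 : Int × Int → Int) (ps : List (Int × Int)) :
    ps.flatMap (fun p => [g (r1 p), g (r2 p)])
      = (ps.flatMap (fun p => [r1 p, r2 p])).map g := by
  induction ps with
  | nil => simp
  | cons p t ih => simp [ih]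

-- the whole pipeline, for a generic matrix [[a,b],[c,d]]
lemma pipeline (a b c d : Int) (n : Nat) (I : List Int) (h : I.length = 2 * n) :
    (pvChunk2 ((pvMultLoop [[a,b],[c,d]] (pvChunk2 I)).2.map (fun m =>
        if m > 26 then PySem.Int.mod m 26 else if m < 0 then pvAddUntil m else m))).foldl
      (fun tc col => col.foldl (fun tc c => tc ++ [PySem.List.pyGetD pvT c '?']) tc) []
    = (PySem.List.pyRange 0 (I.length : Int) 2).foldl (fun out j =>
        let p0 := PySem.List.pyGetD I j 0
        let p1 := PySem.List.pyGetD I (j + 1) 0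
        [a * p0 + b * p1, c * p0 + d * p1].foldl (fun out v =>
          let v := if v > 26 then PySem.Int.mod v 26 else if v < 0 then PySem.Int.mod v 26 else v
          out ++ [PySem.List.pyGetD pvT v '?']) out) [] := by
  -- A side
  rw [chunk2_eq n I h, multLoop_eq]
  set adjA := fun m : Int => if m > 26 then PySem.Int.mod m 26 else if m < 0 then pvAddUntil m else m with hadjA
  set adjB := fun v : Int => if v > 26 then PySem.Int.mod v 26 else if v < 0 then PySem.Int.mod v 26 else v with hadjB
  set letterF := fun c : Int => PySem.List.pyGetD pvT c '?' with hletter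
  set raw := fun p : Int × Int => [a*p.1 + b*p.2, c*p.1 + d*p.2] with hraw
  have hM0even : ((pvPairs I).flatMap raw).length = 2 * (pvPairs I).length :=
    len_flatMap_raw a b c d (pvPairs I)
  have hlen2 : (((pvPairs I).flatMap raw).map adjA).length = 2 * (pvPairs I).length := by
    rw [List.length_map]; exact hM0even
  rw [chunk2_eq (pvPairs I).length _ hlen2, tcLoop, List.flatMap_map]
  have hfn : (fun p : Int × Int => List.map letterF [p.1, p.2]) = fun p => [letterF p.1, letterF p.2] := by
    funext p; rfl
  rw [hfn, pairsLetters adjA letterF (pvPairs I).length _ hM0even]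
  -- B side
  rw [foldG (fun out p0 p1 =>
      [a * p0 + b * p1, c * p0 + d * p1].foldl (fun out v =>
        let v := if v > 26 then PySem.Int.mod v 26 else if v < 0 then PySem.Int.mod v 26 else v
        out ++ [PySem.List.pyGetD pvT v '?']) out) n I h]
  have hbody : ∀ (out : List Char) (p : Int × Int),
      ([a * p.1 + b * p.2, c * p.1 + d * p.2] : List Int).foldl (fun out v =>
        let v := if v > 26 then PySem.Int.mod v 26 else if v < 0 then PySem.Int.mod v 26 else v
        out ++ [PySem.List.pyGetD pvT v '?']) out
      = out ++ [letterF (adjB (a * p.1 + b * p.2)), letterF (adjB (c * p.1 + d * p.2))] := by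
    intro out p
    simp [List.foldl_cons, List.foldl_nil, hletter, hadjB]
  have hcong := PySem.List.foldl_congr_mem (l := pvPairs I) (init := ([] : List Char))
      (f := fun (acc : List Char) (p : Int × Int) =>
        ([a * p.1 + b * p.2, c * p.1 + d * p.2] : List Int).foldl (fun out v =>
          let v := if v > 26 then PySem.Int.mod v 26 else if v < 0 then PySem.Int.mod v 26 else v
          out ++ [PySem.List.pyGetD pvT v '?']) acc)
      (g := fun out (p : Int × Int) =>
        out ++ [letterF (adjB (a * p.1 + b * p.2)), letterF (adjB (c * p.1 + d * p.2))])
      (fun out p _ => hbody out p)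
  rw [hcong]
  rw [PySem.List.foldl_append_eq_flatMap
      (fun p : Int × Int => [letterF (adjB (a * p.1 + b * p.2)), letterF (adjB (c * p.1 + d * p.2))])]
  rw [List.nil_append]
  rw [flatMapLetters (fun v => letterF (adjB v))
      (fun p : Int × Int => a * p.1 + b * p.2) (fun p : Int × Int => c * p.1 + d * p.2) (pvPairs I)]
  show _ = ((pvPairs I).flatMap raw).map (fun v => letterF (adjB v))
  apply List.map_congr_left
  intro v _
  show letterF (adjA v) = letterF (adjB v)
  rw [hadjA, hadjB]
  simp only []
  rw [adj_eq v]

-- ===== VERDICT (by name: the statement is the Claim_ definition above) =====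
theorem criptografiaDescriptografia_spec : Claim_equal_criptografiaDescriptografia := by
  intro palavra x _ _
  unfold Spec_criptografiaDescriptografia criptografiaDescriptografia criptografiaDescriptografia_alt
  obtain ⟨n, hn⟩ := pad_even palavra
  by_cases hx : x = 1
  · simp only [if_pos hx]
    rw [pipeline 11 13 2 3 n _ hn]
    by_cases hc : palavra.toList.length % 2 ≠ 0
    · rw [if_pos hc, if_pos hc]
    · rw [if_neg hc, if_neg hc]
  · simp only [if_neg hx]
    rw [pipeline 45 (-195) (-30) 165 n _ hn]
    by_cases hc : palavra.toList.length % 2 ≠ 0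
    · rw [if_pos hc, if_pos hc]
    · rw [if_neg hc, if_neg hc]
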